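-- pv_equiv track=rewrite | github.com/shawinsoranakom/CodeSnippets | CollectedSnippets/ComplexMethod/cm012729.py | _normalize_cuda_arch
-- ===== SOURCE A (Python) =====
-- def _normalize_cuda_arch(arch: str) -> str:
--     arch_num = arch
--     if isinstance(arch, str):
--         digits = "".join(ch for ch in arch if ch.isdigit())
--         if not digits:
--             raise ValueError(f"Unrecognized cuda arch: {arch}")
--         arch_num = int(digits)
--     else:
--         arch_num = int(arch)
--
--     if arch_num > 103:
--         log.warning("Detected CUDA architecture > 103: %s. Please file an issue.", arch)
--         return str(arch_num)
--     if arch_num >= 103: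
--         return "103"
--     if arch_num >= 100:
--         return "100"
--     if arch_num >= 90:
--         return "90"
--     if arch_num >= 80:
--         return "80"
--     if arch_num >= 75:
--         return "75"
--     if arch_num >= 70:
--         return "70"
--     raise NotImplementedError(f"Unsupported cuda arch: {arch}")
-- ===== SOURCE B (Python) =====
-- def _normalize_cuda_arch(arch: str) -> str:
--     digits = "".join(ch for ch in arch if ch.isdigit())
--     if not digits:
--         raise ValueError(f"Unrecognized cuda arch: {arch}")
--     arch_num = int(digits)
--     if arch_num < 70:
--         raise NotImplementedError(f"Unsupported cuda arch: {arch}")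
--     if arch_num < 80:
--         return str(arch_num - arch_num % 5)   # 70..74 -> 70, 75..79 -> 75
--     if arch_num < 103:
--         return str(arch_num - arch_num % 10)  # 80..89 -> 80, 90..99 -> 90, 100..102 -> 100
--     return str(arch_num)                      # 103 -> "103"; > 103 passes through unchanged
-- ===== Notes on version B (the rewrite author's own statement) =====
-- stated objective: simpler
-- what changed: The six-way descending >= comparison cascade is replaced by closed-form arithmetic bucketing: round down with n - n % 5 below 80 and n - n % 10 below 103, with 103 and above passing through str(n), so no threshold table or cascade exists at all.
-- crash fix: On inputs whose extracted digits parse to arch_num > 103 A raises NameError (its log.warning references an undefined logger), while B returns str(arch_num) as the code evidently intended. — e.g. on _normalize_cuda_arch("sm_120"): A raises NameError, B returns "120"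
import Mathlib
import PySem

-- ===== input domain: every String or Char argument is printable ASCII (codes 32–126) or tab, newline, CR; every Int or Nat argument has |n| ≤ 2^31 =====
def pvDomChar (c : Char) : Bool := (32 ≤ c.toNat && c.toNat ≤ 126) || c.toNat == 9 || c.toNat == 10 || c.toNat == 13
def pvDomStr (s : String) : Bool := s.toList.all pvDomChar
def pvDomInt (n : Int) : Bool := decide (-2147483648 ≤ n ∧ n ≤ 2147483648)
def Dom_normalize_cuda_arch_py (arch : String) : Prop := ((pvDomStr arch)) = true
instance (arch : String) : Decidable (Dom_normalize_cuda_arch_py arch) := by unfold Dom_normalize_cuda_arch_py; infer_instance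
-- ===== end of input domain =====

-- B replaces A's six-way comparison cascade by closed-form arithmetic bucketing (n - n % 5 / n - n % 10);
-- Pre_ excludes the inputs where A raises (no digits → ValueError, < 70 → NotImplementedError,
-- > 103 → NameError from an undefined logger); on that last region B returns str(n) instead (Raises_ block).

-- ===== PORT A =====
def normalize_cuda_arch_py (arch : String) : String :=
  match PySem.Int.ofStr? (String.ofList (arch.toList.filter PySem.Chars.isdigit)) with
  | none => ""  -- raise ValueError
  | some arch_num =>
    if arch_num > 103 then PySem.Int.toStr arch_num  -- (the log.warning call hits an undefined logger: NameError)
    else if arch_num ≥ 103 then "103"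
    else if arch_num ≥ 100 then "100"
    else if arch_num ≥ 90 then "90"
    else if arch_num ≥ 80 then "80"
    else if arch_num ≥ 75 then "75"
    else if arch_num ≥ 70 then "70"
    else ""  -- raise NotImplementedError

-- ===== PORT B =====
def normalize_cuda_arch_py_alt (arch : String) : String :=
  match PySem.Int.ofStr? (String.ofList (arch.toList.filter PySem.Chars.isdigit)) with
  | none => ""  -- raise ValueError
  | some arch_num =>
    if arch_num < 70 then ""  -- raise NotImplementedError
    else if arch_num < 80 then PySem.Int.toStr (arch_num - PySem.Int.mod arch_num 5)
    else if arch_num < 103 then PySem.Int.toStr (arch_num - PySem.Int.mod arch_num 10)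
    else PySem.Int.toStr arch_num

-- ===== PRECONDITION & SPEC =====
-- Pre_ = exactly the inputs where the shipped A returns: some digit present and 70 ≤ arch_num ≤ 103
-- (no digits → ValueError; < 70 → NotImplementedError; > 103 → NameError, the logger is undefined).
def Pre_normalize_cuda_arch_py (arch : String) : Prop :=
  let o := PySem.Int.ofStr? (String.ofList (arch.toList.filter PySem.Chars.isdigit));
  o.isSome = true ∧ 70 ≤ o.getD 0 ∧ o.getD 0 ≤ 103
instance (arch : String) : Decidable (Pre_normalize_cuda_arch_py arch) := by
  unfold Pre_normalize_cuda_arch_py; infer_instance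
def pvWitness_normalize_cuda_arch_py : String := "sm_90"

-- On inputs whose digits parse to arch_num > 103, A raises NameError (log.warning on an undefined
-- logger) while B returns str(arch_num) as the code evidently intended.
def Raises_normalize_cuda_arch_py (arch : String) : Prop :=
  let o := PySem.Int.ofStr? (String.ofList (arch.toList.filter PySem.Chars.isdigit));
  o.isSome = true ∧ 103 < o.getD 0
instance (arch : String) : Decidable (Raises_normalize_cuda_arch_py arch) := by
  unfold Raises_normalize_cuda_arch_py; infer_instance
def pvRaiseWitness_normalize_cuda_arch_py : String := "sm_120"
def pvRaiseWitnessOut_normalize_cuda_arch_py : String := "120"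

def Spec_normalize_cuda_arch_py (arch : String) (out : String) : Prop := out = normalize_cuda_arch_py_alt arch
instance (arch : String) (out : String) : Decidable (Spec_normalize_cuda_arch_py arch out) := by unfold Spec_normalize_cuda_arch_py; infer_instance

-- ===== CLAIM =====
def Claim_equal_normalize_cuda_arch_py : Prop := ∀ (arch : String), Dom_normalize_cuda_arch_py arch → Pre_normalize_cuda_arch_py arch → Spec_normalize_cuda_arch_py arch (normalize_cuda_arch_py arch)
def Claim_raises_normalize_cuda_arch_py : Prop := (∀ (arch : String), Dom_normalize_cuda_arch_py arch → Raises_normalize_cuda_arch_py arch → ¬ Pre_normalize_cuda_arch_py arch) ∧ (Dom_normalize_cuda_arch_py (pvRaiseWitness_normalize_cuda_arch_py) ∧ Raises_normalize_cuda_arch_py (pvRaiseWitness_normalize_cuda_arch_py) ∧ normalize_cuda_arch_py_alt (pvRaiseWitness_normalize_cuda_arch_py) = pvRaiseWitnessOut_normalize_cuda_arch_py)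

-- ===== LEMMAS AND PROOFS =====

-- ===== VERDICT =====
theorem normalize_cuda_arch_py_spec : Claim_equal_normalize_cuda_arch_py := by
  intro arch _ hpre
  unfold Pre_normalize_cuda_arch_py at hpre
  unfold Spec_normalize_cuda_arch_py normalize_cuda_arch_py normalize_cuda_arch_py_alt
  cases h : PySem.Int.ofStr? (String.ofList (arch.toList.filter PySem.Chars.isdigit)) with
  | none => simp [h] at hpre
  | some n =>
    simp only [h, Option.getD_some] at hpre
    obtain ⟨-, h70, h103⟩ := hpre
    interval_cases n <;> rfl

@[simp]
theorem normalize_cuda_arch_py_raises : Claim_raises_normalize_cuda_arch_py := by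
  unfold Claim_raises_normalize_cuda_arch_py
  refine ⟨?_, by decide⟩
  intro arch _ hr hp
  unfold Raises_normalize_cuda_arch_py at hr
  unfold Pre_normalize_cuda_arch_py at hp
  omega
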